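-- pv_equiv track=rewrite | github.com/emirhaneren/BinarySearchTree | AgacMetotlari.py | BSTDiziOlustur
-- ===== SOURCE A (Python) =====
-- def BSTDiziOlustur(AgacDizisi, inputValue):
--     # textbox'tan okunan değerleri BTS yapısına uygun bir diziye aktarır
--     if(AgacDizisi[0]==0):#Kok değeri 0 ise gelen değeri başlangıç kök değeri yapar
--         AgacDizisi[0]=inputValue
--     else:
--         kokIndeks = 0
--         while kokIndeks < len(AgacDizisi):
--             # sol alt ağaca mı ?
--             if inputValue < AgacDizisi[kokIndeks]:
--                 solIndeks = 2 * kokIndeks + 1  # solun indeksini al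
--                 if solIndeks <= len(AgacDizisi) and AgacDizisi[solIndeks] == 0:  # solunda yer var mı ?
--                     AgacDizisi[solIndeks] = inputValue #solunda yer varsa yerleş
--                     break
--                 kokIndeks = solIndeks  # yer yoksa solu kök olarak al
--                 # sağ alt ağaç mı ?
--             elif inputValue > AgacDizisi[kokIndeks]:
--                     sagIndeks = 2 * kokIndeks + 2  # sağın indeksini al
--                     if sagIndeks <= len(AgacDizisi) and AgacDizisi[sagIndeks] == 0:  # sağında yer var mı ?
--                         AgacDizisi[sagIndeks] = inputValue
--                         break
--                     kokIndeks = sagIndeks  # sağında yer varsa yerleş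
--             else:
--                 break  #aynı değer varsa ekleme
--     return AgacDizisi
-- ===== SOURCE B (Python) =====
-- def BSTDiziOlustur(AgacDizisi, inputValue):
--     # Scan every cell; an empty cell is THE insertion slot iff its whole ancestor
--     # chain is occupied and each ancestor's comparison routes inputValue towards it
--     # (such a slot is unique, since the comparisons determine one root-to-slot path).
--     n = len(AgacDizisi)
--     for j in range(n):
--         if AgacDizisi[j] != 0:
--             continue
--         i = j
--         ok = True
--         while i > 0:
--             p = (i - 1) // 2
--             pv = AgacDizisi[p]
--             if pv == 0:
--                 ok = False
--                 break
--             if i == 2 * p + 1: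
--                 if not (inputValue < pv):
--                     ok = False
--                     break
--             else:
--                 if not (inputValue > pv):
--                     ok = False
--                     break
--             i = p
--         if ok:
--             AgacDizisi[j] = inputValue
--             break
--     return AgacDizisi
-- ===== Notes on version B (the rewrite author's own statement) =====
-- stated objective: alternative
-- what changed: B abandons the top-down pointer descent entirely: it scans every array cell once and, for each empty cell, verifies bottom-up that its whole ancestor chain is occupied and routes inputValue towards it (such a slot is unique), then performs the single write.
import Mathlib
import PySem

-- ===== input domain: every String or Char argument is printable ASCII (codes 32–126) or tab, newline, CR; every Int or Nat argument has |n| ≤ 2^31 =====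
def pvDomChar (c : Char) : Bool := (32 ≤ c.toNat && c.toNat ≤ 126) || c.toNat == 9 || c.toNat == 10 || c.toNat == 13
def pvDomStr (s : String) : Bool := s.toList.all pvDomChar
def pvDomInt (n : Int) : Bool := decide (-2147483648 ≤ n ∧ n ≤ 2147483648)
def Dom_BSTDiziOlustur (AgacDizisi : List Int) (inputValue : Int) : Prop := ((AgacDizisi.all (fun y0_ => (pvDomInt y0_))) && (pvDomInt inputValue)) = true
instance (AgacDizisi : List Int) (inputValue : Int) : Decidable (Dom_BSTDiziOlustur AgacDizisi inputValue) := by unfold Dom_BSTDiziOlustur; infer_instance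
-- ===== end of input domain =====

-- B replaces A's top-down descent by a one-pass scan that validates each empty cell's ancestor
-- chain bottom-up (alternative algorithm, same result); the equivalence proved is about the
-- RETURN value (A mutates its list argument in place; B performs its one write in place too).

-- ===== PORT A =====
-- A's while loop; the descent index strictly increases, so fuel = a.length bounds the
-- iteration count exactly (the fuel-0 case is reached only with kok ≥ a.length, where the
-- Python loop also exits).  `AgacDizisi[solIndeks]` with solIndeks == len(AgacDizisi) raises
-- IndexError in Python — those inputs are outside Pre_ (here List.getD yields 0 and List.set
-- is a no-op instead).
def BSTLoopA (a : List Int) (v : Int) : Nat → Nat → List Int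
  | 0, _ => a
  | fuel + 1, kok =>
    if kok < a.length then
      if v < a.getD kok 0 then
        if 2 * kok + 1 ≤ a.length ∧ a.getD (2 * kok + 1) 0 = 0 then a.set (2 * kok + 1) v
        else BSTLoopA a v fuel (2 * kok + 1)
      else if a.getD kok 0 < v then
        if 2 * kok + 2 ≤ a.length ∧ a.getD (2 * kok + 2) 0 = 0 then a.set (2 * kok + 2) v
        else BSTLoopA a v fuel (2 * kok + 2)
      else a
    else a

def BSTDiziOlustur (AgacDizisi : List Int) (inputValue : Int) : List Int :=
  -- `AgacDizisi[0]` raises on the empty list in Python; excluded by Pre_.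
  if AgacDizisi.getD 0 0 = 0 then AgacDizisi.set 0 inputValue
  else BSTLoopA AgacDizisi inputValue AgacDizisi.length 0

-- ===== PORT B =====
-- B's inner while loop (bottom-up ancestor-chain check); the index shrinks from i+1 to
-- (i+1-1)/2 = i/2, so fuel = i bounds the iteration count.
def chainOK (a : List Int) (v : Int) : Nat → Nat → Bool
  | _, 0 => true
  | 0, _ + 1 => false
  | f + 1, i + 1 =>
    let p := i / 2
    let pv := a.getD p 0
    if pv = 0 then false
    else if i + 1 = 2 * p + 1 then
      if v < pv then chainOK a v f p else false
    else
      if pv < v then chainOK a v f p else false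

-- B's `for j in range(n)` with break: fuel = number of remaining indices
def scanLoop (a : List Int) (v : Int) : Nat → Nat → List Int
  | 0, _ => a
  | f + 1, j =>
    if a.getD j 0 ≠ 0 then scanLoop a v f (j + 1)
    else if chainOK a v j j then a.set j v
    else scanLoop a v f (j + 1)

def BSTDiziOlustur_alt (AgacDizisi : List Int) (inputValue : Int) : List Int :=
  scanLoop AgacDizisi inputValue AgacDizisi.length 0

-- ===== PRECONDITION & SPEC =====
-- "the descent reaches array index k": every ancestor of k holds a nonzero value and each
-- comparison on the ancestor chain routes towards k (fuel = k bounds the chain length)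
def ReachIdxF (a : List Int) (v : Int) : Nat → Nat → Bool
  | _, 0 => a.getD 0 0 != 0
  | 0, _ + 1 => false
  | f + 1, k + 1 =>
    ReachIdxF a v f (k / 2) && (a.getD (k + 1) 0 != 0) &&
      (if k + 1 = 2 * (k / 2) + 1 then decide (v < a.getD (k / 2) 0)
       else decide (a.getD (k / 2) 0 < v))

def ReachIdx (a : List Int) (v : Int) (k : Nat) : Bool := ReachIdxF a v k k

-- A raises IndexError iff the descent reaches the unique node whose child index equals
-- len(AgacDizisi) and the comparison there routes to that child
def raiseCond (a : List Int) (v : Int) : Bool :=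
  if a.length = 0 then false
  else
    ReachIdx a v ((a.length - 1) / 2) &&
      (if a.length % 2 = 1 then decide (v < a.getD ((a.length - 1) / 2) 0)
       else decide (a.getD ((a.length - 1) / 2) 0 < v))

-- Pre_ excludes exactly the inputs where A raises IndexError: the empty list (A reads
-- AgacDizisi[0]) and the inputs where the descent evaluates AgacDizisi[len(AgacDizisi)].
def Pre_BSTDiziOlustur (AgacDizisi : List Int) (inputValue : Int) : Prop :=
  AgacDizisi ≠ [] ∧ raiseCond AgacDizisi inputValue = false
instance (AgacDizisi : List Int) (inputValue : Int) : Decidable (Pre_BSTDiziOlustur AgacDizisi inputValue) := by unfold Pre_BSTDiziOlustur; infer_instance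

def pvWitness_BSTDiziOlustur : List Int × Int := ([5, 3, 7, 0, 0, 0, 0], 4)

def Spec_BSTDiziOlustur (AgacDizisi : List Int) (inputValue : Int) (out : List Int) : Prop := out = BSTDiziOlustur_alt AgacDizisi inputValue
instance (AgacDizisi : List Int) (inputValue : Int) (out : List Int) : Decidable (Spec_BSTDiziOlustur AgacDizisi inputValue out) := by unfold Spec_BSTDiziOlustur; infer_instance

-- ===== CLAIM (what is proved, stated in full; the proofs are below) =====
def Claim_equal_BSTDiziOlustur : Prop := ∀ (AgacDizisi : List Int) (inputValue : Int), Dom_BSTDiziOlustur AgacDizisi inputValue → Pre_BSTDiziOlustur AgacDizisi inputValue → Spec_BSTDiziOlustur AgacDizisi inputValue (BSTDiziOlustur AgacDizisi inputValue)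
-- ===== LEMMAS AND PROOFS =====

-- a proof-only pure descent: the common ground between A's mutating loop and B's scan
def descLoop (a : List Int) (v : Int) : Nat → Nat → Option Nat
  | 0, _ => none
  | f + 1, i =>
    if i < a.length then
      if a.getD i 0 = 0 then some i
      else if v < a.getD i 0 then descLoop a v f (2 * i + 1)
      else if a.getD i 0 < v then descLoop a v f (2 * i + 2)
      else none
    else none

-- ReachIdxF ignores its fuel as long as it is at least the index
lemma reachF_mono (a : List Int) (v : Int) :
    ∀ f f' k, k ≤ f → k ≤ f' → ReachIdxF a v f k = ReachIdxF a v f' k := by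
  intro f
  induction f with
  | zero =>
    intro f' k h1 _
    have hk : k = 0 := by omega
    subst hk
    cases f' <;> rfl
  | succ m ih =>
    intro f' k h1 h2
    cases k with
    | zero => cases f' <;> rfl
    | succ j =>
      cases f' with
      | zero => omega
      | succ f'' =>
        simp only [ReachIdxF]
        rw [ih f'' (j / 2) (by omega) (by omega)]

lemma reach_left (a : List Int) (v : Int) (k : Nat) (hr : ReachIdx a v k = true)
    (hnz : a.getD (2 * k + 1) 0 ≠ 0) (hv : v < a.getD k 0) :
    ReachIdx a v (2 * k + 1) = true := by
  unfold ReachIdx at *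
  show ReachIdxF a v (2 * k + 1) (2 * k + 1) = true
  have hp : 2 * k / 2 = k := by omega
  simp only [ReachIdxF, hp]
  rw [reachF_mono a v (2 * k) k k (by omega) (le_refl k), hr]
  simp [bne_iff_ne]
  exact ⟨hnz, hv⟩

lemma reach_right (a : List Int) (v : Int) (k : Nat) (hr : ReachIdx a v k = true)
    (hnz : a.getD (2 * k + 2) 0 ≠ 0) (hv : a.getD k 0 < v) :
    ReachIdx a v (2 * k + 2) = true := by
  unfold ReachIdx at *
  show ReachIdxF a v ((2 * k + 1) + 1) ((2 * k + 1) + 1) = true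
  have hp : (2 * k + 1) / 2 = k := by omega
  simp only [ReachIdxF, hp]
  rw [reachF_mono a v (2 * k + 1) k k (by omega) (le_refl k), hr]
  have hne : ¬ (2 * k + 1 + 1 = 2 * k + 1) := by omega
  simp [bne_iff_ne]
  exact ⟨hnz, hv⟩

lemma raise_of_left (a : List Int) (v : Int) (k : Nat) (hr : ReachIdx a v k = true)
    (hlen : 2 * k + 1 = a.length) (hv : v < a.getD k 0) : raiseCond a v = true := by
  unfold raiseCond
  have h0 : ¬ (a.length = 0) := by omega
  have hi0 : (a.length - 1) / 2 = k := by omega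
  have hodd : a.length % 2 = 1 := by omega
  rw [if_neg h0, hi0, hr, if_pos hodd]
  simpa using hv

lemma raise_of_right (a : List Int) (v : Int) (k : Nat) (hr : ReachIdx a v k = true)
    (hlen : 2 * k + 2 = a.length) (hv : a.getD k 0 < v) : raiseCond a v = true := by
  unfold raiseCond
  have h0 : ¬ (a.length = 0) := by omega
  have hi0 : (a.length - 1) / 2 = k := by omega
  have hodd : ¬ (a.length % 2 = 1) := by omega
  rw [if_neg h0, hi0, hr, if_neg hodd]
  simpa using hv

-- once the index leaves the array, both A's loop and the descent stop immediately
lemma loop_out_of_range (a : List Int) (v : Int) (f k : Nat) (h : a.length ≤ k) :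
    BSTLoopA a v f k = a ∧ descLoop a v f k = none := by
  cases f <;> simp [BSTLoopA, descLoop, Nat.not_lt.mpr h]

-- the A-side invariant: while no raise can occur, A's descending loop computes exactly
-- "write at the slot the pure descent finds"
lemma loop_eq (a : List Int) (v : Int) : ∀ f k, a.length - k ≤ f →
    k < a.length → a.getD k 0 ≠ 0 → ReachIdx a v k = true → raiseCond a v = false →
    BSTLoopA a v f k = (match descLoop a v f k with
                        | some j => a.set j v
                        | none => a) := by
  intro f
  induction f with
  | zero => intro k hf hk _ _ _; omega
  | succ m ih =>
    intro k hf hk hnz hr hnr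
    simp only [BSTLoopA, descLoop]
    rw [if_pos hk, if_pos hk, if_neg hnz]
    by_cases hv : v < a.getD k 0
    · rw [if_pos hv, if_pos hv]
      by_cases hin : 2 * k + 1 ≤ a.length ∧ a.getD (2 * k + 1) 0 = 0
      · rw [if_pos hin]
        -- insertion: sol = len is impossible (it would be the raising input)
        have hlt : 2 * k + 1 < a.length := by
          rcases Nat.lt_or_ge (2 * k + 1) a.length with h | h
          · exact h
          · exfalso
            have he : 2 * k + 1 = a.length := by omega
            have := raise_of_left a v k hr he hv
            rw [this] at hnr; exact absurd hnr (by simp)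
        cases m with
        | zero => omega
        | succ m' =>
          simp only [descLoop]
          rw [if_pos hlt, if_pos hin.2]
      · rw [if_neg hin]
        by_cases hsl : 2 * k + 1 < a.length
        · have hnz' : a.getD (2 * k + 1) 0 ≠ 0 := fun h => hin ⟨by omega, h⟩
          exact ih (2 * k + 1) (by omega) hsl hnz' (reach_left a v k hr hnz' hv) hnr
        · -- sol ≥ len: sol = len contradicts ¬hin (getD out of range is 0); sol > len: both stop
          have hge : a.length ≤ 2 * k + 1 := by omega
          rcases Nat.eq_or_lt_of_le hge with he | hlt2
          · exact absurd ⟨by omega, List.getD_eq_default _ _ (by omega)⟩ hin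
          · obtain ⟨h1, h2⟩ := loop_out_of_range a v m (2 * k + 1) (by omega)
            rw [h1, h2]
    · rw [if_neg hv, if_neg hv]
      by_cases hv' : a.getD k 0 < v
      · rw [if_pos hv', if_pos hv']
        by_cases hin : 2 * k + 2 ≤ a.length ∧ a.getD (2 * k + 2) 0 = 0
        · rw [if_pos hin]
          have hlt : 2 * k + 2 < a.length := by
            rcases Nat.lt_or_ge (2 * k + 2) a.length with h | h
            · exact h
            · exfalso
              have he : 2 * k + 2 = a.length := by omega
              have := raise_of_right a v k hr he hv'
              rw [this] at hnr; exact absurd hnr (by simp)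
          cases m with
          | zero => omega
          | succ m' =>
            simp only [descLoop]
            rw [if_pos hlt, if_pos hin.2]
        · rw [if_neg hin]
          by_cases hsl : 2 * k + 2 < a.length
          · have hnz' : a.getD (2 * k + 2) 0 ≠ 0 := fun h => hin ⟨by omega, h⟩
            exact ih (2 * k + 2) (by omega) hsl hnz' (reach_right a v k hr hnz' hv') hnr
          · have hge : a.length ≤ 2 * k + 2 := by omega
            rcases Nat.eq_or_lt_of_le hge with he | hlt2
            · exact absurd ⟨by omega, List.getD_eq_default _ _ (by omega)⟩ hin
            · obtain ⟨h1, h2⟩ := loop_out_of_range a v m (2 * k + 2) (by omega)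
              rw [h1, h2]
      · rw [if_neg hv', if_neg hv']

-- ===== B-side lemmas: the scan finds exactly the descent's slot =====

-- chainOK ignores its fuel as long as it is at least the index
lemma chain_mono (a : List Int) (v : Int) :
    ∀ f f' i, i ≤ f → i ≤ f' → chainOK a v f i = chainOK a v f' i := by
  intro f
  induction f with
  | zero =>
    intro f' i h1 _
    have : i = 0 := by omega
    subst this
    cases f' <;> rfl
  | succ m ih =>
    intro f' i h1 h2
    cases i with
    | zero => cases f' <;> rfl
    | succ j =>
      cases f' with
      | zero => omega
      | succ f'' =>
        simp only [chainOK]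
        rw [ih f'' (j / 2) (by omega) (by omega)]

lemma chain_child_left (a : List Int) (v : Int) (k : Nat)
    (hc : chainOK a v k k = true) (hnz : a.getD k 0 ≠ 0) (hv : v < a.getD k 0) :
    chainOK a v (2 * k + 1) (2 * k + 1) = true := by
  show chainOK a v (2 * k + 1) (2 * k + 1) = true
  have hp : 2 * k / 2 = k := by omega
  simp only [chainOK, hp]
  rw [if_neg hnz]
  simp only [if_true]
  rw [if_pos hv, chain_mono a v (2 * k) k k (by omega) (le_refl k)]
  exact hc

lemma chain_child_right (a : List Int) (v : Int) (k : Nat)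
    (hc : chainOK a v k k = true) (hnz : a.getD k 0 ≠ 0) (hv : a.getD k 0 < v) :
    chainOK a v (2 * k + 2) (2 * k + 2) = true := by
  show chainOK a v ((2 * k + 1) + 1) ((2 * k + 1) + 1) = true
  have hp : (2 * k + 1) / 2 = k := by omega
  simp only [chainOK, hp]
  rw [if_neg hnz, if_neg (by omega : ¬ (2 * k + 1 + 1 = 2 * k + 1)), if_pos hv]
  rw [chain_mono a v (2 * k + 1) k k (by omega) (le_refl k)]
  exact hc

-- descLoop ignores its fuel as long as it is at least a.length - k
lemma desc_mono (a : List Int) (v : Int) :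
    ∀ f f' k, a.length - k ≤ f → a.length - k ≤ f' → descLoop a v f k = descLoop a v f' k := by
  intro f
  induction f with
  | zero =>
    intro f' k h1 _
    have hk : a.length ≤ k := by omega
    obtain ⟨-, h⟩ := loop_out_of_range a v f' k hk
    rw [h]; rfl
  | succ m ih =>
    intro f' k h1 h2
    by_cases hk : k < a.length
    · cases f' with
      | zero => omega
      | succ f'' =>
        simp only [descLoop]
        rw [if_pos hk, if_pos hk]
        by_cases h0 : a.getD k 0 = 0
        · rw [if_pos h0, if_pos h0]
        · rw [if_neg h0, if_neg h0]
          by_cases hv : v < a.getD k 0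
          · rw [if_pos hv, if_pos hv]
            exact ih f'' (2 * k + 1) (by omega) (by omega)
          · rw [if_neg hv, if_neg hv]
            by_cases hv' : a.getD k 0 < v
            · rw [if_pos hv', if_pos hv']
              exact ih f'' (2 * k + 2) (by omega) (by omega)
            · rw [if_neg hv', if_neg hv']
    · obtain ⟨-, h⟩ := loop_out_of_range a v (m + 1) k (by omega)
      obtain ⟨-, h'⟩ := loop_out_of_range a v f' k (by omega)
      rw [h, h']

-- one descent step at an occupied node, with the fuel renormalised to a.length
lemma desc_step (a : List Int) (v : Int) (k : Nat) (hk : k < a.length)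
    (hnz : a.getD k 0 ≠ 0) :
    descLoop a v a.length k =
      if v < a.getD k 0 then descLoop a v a.length (2 * k + 1)
      else if a.getD k 0 < v then descLoop a v a.length (2 * k + 2)
      else none := by
  rw [desc_mono a v a.length (a.length - k) k (by omega) (by omega)]
  have h1 : a.length - k = (a.length - k - 1) + 1 := by omega
  rw [h1]
  simp only [descLoop]
  rw [if_pos hk, if_neg hnz]
  by_cases hv : v < a.getD k 0
  · rw [if_pos hv, if_pos hv]
    exact desc_mono a v _ _ _ (by omega) (by omega)
  · rw [if_neg hv, if_neg hv]
    by_cases hv' : a.getD k 0 < v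
    · rw [if_pos hv', if_pos hv']
      exact desc_mono a v _ _ _ (by omega) (by omega)
    · rw [if_neg hv', if_neg hv']

-- the descent stops at an in-range empty cell
lemma desc_at_zero (a : List Int) (v : Int) (k : Nat) (hk : k < a.length)
    (h0 : a.getD k 0 = 0) : descLoop a v a.length k = some k := by
  rw [desc_mono a v a.length (a.length - k) k (by omega) (by omega)]
  have h1 : a.length - k = (a.length - k - 1) + 1 := by omega
  rw [h1]
  simp only [descLoop]
  rw [if_pos hk, if_pos h0]

-- if j's ancestor chain validates, the descent from the root passes through j
lemma desc_through (a : List Int) (v : Int) :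
    ∀ j, chainOK a v j j = true → j < a.length →
      descLoop a v a.length 0 = descLoop a v a.length j := by
  intro j
  induction j using Nat.strong_induction_on with
  | _ j ih =>
    intro hc hj
    cases j with
    | zero => rfl
    | succ m =>
      have hp : m / 2 < m + 1 := by omega
      simp only [chainOK] at hc
      by_cases h0 : a.getD (m / 2) 0 = 0
      · rw [if_pos h0] at hc; exact absurd hc (by simp)
      · rw [if_neg h0] at hc
        have hpl : m / 2 < a.length := by omega
        by_cases hL : m + 1 = 2 * (m / 2) + 1
        · rw [if_pos hL] at hc
          by_cases hv : v < a.getD (m / 2) 0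
          · rw [if_pos hv] at hc
            have hcp : chainOK a v (m / 2) (m / 2) = true := by
              rw [chain_mono a v (m / 2) m (m / 2) (le_refl _) (by omega)]; exact hc
            rw [ih (m / 2) hp hcp hpl, desc_step a v (m / 2) hpl h0, if_pos hv, ← hL]
          · rw [if_neg hv] at hc; exact absurd hc (by simp)
        · rw [if_neg hL] at hc
          have hR : m + 1 = 2 * (m / 2) + 2 := by omega
          by_cases hv : a.getD (m / 2) 0 < v
          · rw [if_pos hv] at hc
            have hcp : chainOK a v (m / 2) (m / 2) = true := by
              rw [chain_mono a v (m / 2) m (m / 2) (le_refl _) (by omega)]; exact hc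
            rw [ih (m / 2) hp hcp hpl, desc_step a v (m / 2) hpl h0,
              if_neg (by omega : ¬ v < a.getD (m / 2) 0), if_pos hv, ← hR]
          · rw [if_neg hv] at hc; exact absurd hc (by simp)

-- a validated empty cell IS the descent's slot
lemma slot_desc (a : List Int) (v : Int) (j : Nat) (hj : j < a.length)
    (h0 : a.getD j 0 = 0) (hc : chainOK a v j j = true) :
    descLoop a v a.length 0 = some j := by
  rw [desc_through a v j hc hj]
  exact desc_at_zero a v j hj h0

-- conversely, the descent's slot is an in-range validated empty cell
lemma desc_slot (a : List Int) (v : Int) :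
    ∀ f k j, chainOK a v k k = true → descLoop a v f k = some j →
      j < a.length ∧ a.getD j 0 = 0 ∧ chainOK a v j j = true := by
  intro f
  induction f with
  | zero => intro k j _ h; exact absurd h (by simp [descLoop])
  | succ m ih =>
    intro k j hc h
    simp only [descLoop] at h
    by_cases hk : k < a.length
    · rw [if_pos hk] at h
      by_cases h0 : a.getD k 0 = 0
      · rw [if_pos h0] at h
        obtain rfl : k = j := by injection h
        exact ⟨hk, h0, hc⟩
      · rw [if_neg h0] at h
        by_cases hv : v < a.getD k 0
        · rw [if_pos hv] at h
          exact ih (2 * k + 1) j (chain_child_left a v k hc h0 hv) h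
        · rw [if_neg hv] at h
          by_cases hv' : a.getD k 0 < v
          · rw [if_pos hv'] at h
            exact ih (2 * k + 2) j (chain_child_right a v k hc h0 hv') h
          · rw [if_neg hv'] at h; exact absurd h (by simp)
    · rw [if_neg hk] at h; exact absurd h (by simp)

-- the scan reaches the descent's slot and writes there
lemma scan_some (a : List Int) (v : Int) (t : Nat)
    (hd : descLoop a v a.length 0 = some t) :
    ∀ f j, j ≤ t → t < j + f → scanLoop a v f j = a.set t v := by
  obtain ⟨ht, h0, hc⟩ := desc_slot a v a.length 0 t rfl hd
  intro f
  induction f with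
  | zero => intro j h1 h2; omega
  | succ m ih =>
    intro j h1 h2
    simp only [scanLoop]
    by_cases hjt : j = t
    · subst hjt
      rw [if_neg (not_not_intro h0), if_pos hc]
    · have hjlt : j < t := by omega
      by_cases hz : a.getD j 0 = 0
      · have hnc : ¬ chainOK a v j j = true := by
          intro hcj
          have := slot_desc a v j (by omega) hz hcj
          rw [hd] at this
          exact hjt (by injection this; omega)
        rw [if_neg (not_not_intro hz), if_neg hnc]
        exact ih (j + 1) (by omega) (by omega)
      · rw [if_pos hz]
        exact ih (j + 1) (by omega) (by omega)

-- when the descent finds no slot, the scan rejects every cell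
lemma scan_none (a : List Int) (v : Int)
    (hd : descLoop a v a.length 0 = none) :
    ∀ f j, j + f ≤ a.length → scanLoop a v f j = a := by
  intro f
  induction f with
  | zero => intro j _; rfl
  | succ m ih =>
    intro j hjf
    simp only [scanLoop]
    by_cases hz : a.getD j 0 = 0
    · have hnc : ¬ chainOK a v j j = true := by
        intro hcj
        have := slot_desc a v j (by omega) hz hcj
        rw [hd] at this
        exact absurd this (by simp)
      rw [if_neg (not_not_intro hz), if_neg hnc]
      exact ih (j + 1) (by omega)
    · rw [if_pos hz]
      exact ih (j + 1) (by omega)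

-- B computes "write at the descent's slot"
lemma alt_eq_desc (a : List Int) (v : Int) :
    BSTDiziOlustur_alt a v = (match descLoop a v a.length 0 with
                              | some t => a.set t v
                              | none => a) := by
  unfold BSTDiziOlustur_alt
  cases hd : descLoop a v a.length 0 with
  | none => exact scan_none a v hd a.length 0 (by omega)
  | some t =>
    obtain ⟨ht, -, -⟩ := desc_slot a v a.length 0 t rfl hd
    exact scan_some a v t hd a.length 0 (by omega) (by omega)

-- ===== VERDICT (by name: the statements are the Claim_ definitions above) =====
theorem BSTDiziOlustur_spec : Claim_equal_BSTDiziOlustur := by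
  intro a v _ hpre
  unfold Spec_BSTDiziOlustur BSTDiziOlustur
  rw [alt_eq_desc a v]
  have hlen : 0 < a.length := by
    cases a with
    | nil => exact absurd rfl hpre.1
    | cons x xs => simp
  by_cases h0 : a.getD 0 0 = 0
  · rw [if_pos h0, desc_at_zero a v 0 hlen h0]
  · rw [if_neg h0]
    have hr : ReachIdx a v 0 = true := by
      unfold ReachIdx
      simp [ReachIdxF, bne_iff_ne]
      exact h0
    exact loop_eq a v a.length 0 (by omega) hlen h0 hr hpre.2
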